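-- pv_equiv track=rewrite | github.com/tiansunsupernova/leetcoding | tian/65_valid_number.py | isDecimal
-- ===== SOURCE A (Python) =====
-- def isDecimal(s):
--     hasDot = False
--     hasDigit = False
--     if len(s) == 0: return False
--     for i, c in enumerate(s):
--         if c == "+" or c == "-":
--             if i != 0: return False
--             if i == len(s) - 1: return False
--         elif c == '.':
--             if hasDot: return False
--             if len(s) == 1: return False
--             hasDot = True
--         else:
--             if not c.isdigit(): return False
--             else: hasDigit = True
--     return hasDigit
-- ===== SOURCE B (Python) =====
-- def isDecimal(s):
--     if not s:
--         return False
--     if s[0] in '+-':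
--         s = s[1:]
--         if not s:
--             return False
--     if s.count('.') > 1:
--         return False
--     return s.replace('.', '').isdigit()
-- ===== Notes on version B (the rewrite author's own statement) =====
-- stated objective: simpler
-- what changed: Replaces A's index-by-index finite-state scan (per-position sign/dot/digit checks with hasDot/hasDigit flags) by a structural decomposition: peel an optional leading sign, then validate the remainder in aggregate with s.count('.') <= 1 and s.replace('.','').isdigit().
import Mathlib
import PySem

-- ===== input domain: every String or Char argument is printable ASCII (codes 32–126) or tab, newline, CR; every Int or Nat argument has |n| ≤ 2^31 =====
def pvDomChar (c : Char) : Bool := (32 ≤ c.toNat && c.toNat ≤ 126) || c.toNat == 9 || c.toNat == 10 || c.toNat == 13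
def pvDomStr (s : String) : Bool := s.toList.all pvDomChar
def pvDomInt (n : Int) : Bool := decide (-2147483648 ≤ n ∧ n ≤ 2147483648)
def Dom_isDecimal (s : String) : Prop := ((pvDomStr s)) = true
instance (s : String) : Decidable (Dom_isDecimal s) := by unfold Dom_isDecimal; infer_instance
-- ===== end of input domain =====

-- B replaces A's stateful index-by-index scan with a sign peel plus aggregate dot-count /
-- digit-test predicates (objective: simpler).

-- ===== PORT A =====
-- the 'for i, c in enumerate(s)' loop of A, carrying its state (hasDot, hasDigit)
def isDecimalGo (n : Nat) (hasDot hasDigit : Bool) (i : Nat) : List Char → Bool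
  | [] => hasDigit
  | c :: rest =>
    if c = '+' ∨ c = '-' then
      if i ≠ 0 then false
      else if i = n - 1 then false
      else isDecimalGo n hasDot hasDigit (i + 1) rest
    else if c = '.' then
      if hasDot then false
      else if n = 1 then false
      else isDecimalGo n true hasDigit (i + 1) rest
    else
      if !(PySem.Chars.isdigit c) then false
      else isDecimalGo n hasDot true (i + 1) rest

def isDecimal (s : String) : Bool :=
  let cs := s.toList
  if cs.length = 0 then false
  else isDecimalGo cs.length false false 0 cs

-- ===== PORT B =====
-- Source B after the sign peel: at most one '.', and dropping the dots leaves pure digits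
def isDecimalBody (cs : List Char) : Bool :=
  if PySem.Chars.count cs ['.'] > 1 then false
  else PySem.Chars.strIsdigit (PySem.Chars.replace cs ['.'] [])

def isDecimal_alt (s : String) : Bool :=
  match s.toList with
  | [] => false
  | c :: rest =>
    if c = '+' ∨ c = '-' then
      if rest.isEmpty then false else isDecimalBody rest
    else isDecimalBody (c :: rest)

-- ===== PRECONDITION & SPEC =====
def Spec_isDecimal (s : String) (out : Bool) : Prop := out = isDecimal_alt s
instance (s : String) (out : Bool) : Decidable (Spec_isDecimal s out) := by unfold Spec_isDecimal; infer_instance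

-- ===== CLAIM (what is proved, stated in full; the proofs are below) =====
def Claim_equal_isDecimal : Prop := ∀ (s : String), Dom_isDecimal s → Spec_isDecimal s (isDecimal s)

-- ===== LEMMAS AND PROOFS =====

-- PySem.Chars.count with a single-character needle is List.count
theorem countGo_single (c : Char) : ∀ (l : List Char) (fuel acc : Nat), l.length ≤ fuel →
    PySem.Chars.count.go [c] fuel l acc = acc + l.count c := by
  intro l
  induction l with
  | nil => intro fuel acc _; cases fuel <;> simp [PySem.Chars.count.go]
  | cons h t ih =>
    intro fuel acc hle
    cases fuel with
    | zero => simp at hle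
    | succ f =>
      simp only [PySem.Chars.count.go, List.isPrefixOf_cons₂, List.isPrefixOf_nil_left,
        Bool.and_true, List.length_cons, List.length_nil, List.drop_succ_cons, List.drop_zero]
      by_cases hc : c = h
      · subst hc
        rw [if_pos (by simp)]
        rw [ih f (acc + 1) (by simp only [List.length_cons] at hle; omega)]
        rw [List.count_cons]
        simp
        omega
      · rw [if_neg (by simp [hc])]
        rw [ih f acc (by simp only [List.length_cons] at hle; omega)]
        rw [List.count_cons]
        simp [Ne.symm hc]

theorem count_single (c : Char) (l : List Char) :
    PySem.Chars.count l [c] = l.count c := by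
  have : PySem.Chars.count l [c] = PySem.Chars.count.go [c] l.length l 0 := by
    simp [PySem.Chars.count]
  rw [this, countGo_single c l l.length 0 (le_refl _)]
  omega

-- PySem.Chars.replace of a single character by "" is a filter
theorem replaceGo_single (c : Char) : ∀ (l : List Char) (fuel : Nat) (acc : List Char), l.length ≤ fuel →
    PySem.Chars.replace.go [c] [] fuel l acc = acc.reverse ++ l.filter (fun x => !(x == c)) := by
  intro l
  induction l with
  | nil => intro fuel acc _; cases fuel <;> simp [PySem.Chars.replace.go]
  | cons h t ih =>
    intro fuel acc hle
    cases fuel with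
    | zero => simp at hle
    | succ f =>
      simp only [PySem.Chars.replace.go, List.isPrefixOf_cons₂, List.isPrefixOf_nil_left,
        Bool.and_true, List.length_cons, List.length_nil, List.drop_succ_cons, List.drop_zero]
      by_cases hc : c = h
      · subst hc
        rw [if_pos (by simp)]
        simp only [List.reverse_nil, List.nil_append]
        rw [ih f acc (by simp only [List.length_cons] at hle; omega)]
        simp
      · rw [if_neg (by simp [hc])]
        rw [ih f (h :: acc) (by simp only [List.length_cons] at hle; omega)]
        simp [Ne.symm hc]

theorem replace_single (c : Char) (l : List Char) :
    PySem.Chars.replace l [c] [] = l.filter (fun x => !(x == c)) := by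
  have : PySem.Chars.replace l [c] [] = PySem.Chars.replace.go [c] [] l.length l [] := by
    simp [PySem.Chars.replace]
  rw [this, replaceGo_single c l l.length [] (le_refl _)]
  simp

-- "drop the dots and test isdigit" in aggregate form
theorem strIsdigit_filter (cs : List Char) :
    PySem.Chars.strIsdigit (cs.filter (fun x => !(x == '.')))
      = (cs.all (fun x => PySem.Chars.isdigit x || x == '.') && cs.any PySem.Chars.isdigit) := by
  induction cs with
  | nil => simp [PySem.Chars.strIsdigit]
  | cons c rest ih =>
    rw [List.filter_cons, List.all_cons, List.any_cons]
    by_cases hc : c = '.'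
    · subst hc
      rw [if_neg (by simp)]
      have hdot : PySem.Chars.isdigit '.' = false := by decide
      simp [ih, hdot]
    · rw [if_pos (by simp [hc])]
      by_cases hd : PySem.Chars.isdigit c
      · simp [PySem.Chars.strIsdigit, hd, Bool.or_comm]
      · simp [PySem.Chars.strIsdigit, hd, hc]

theorem isDecimalBody_eq (cs : List Char) :
    isDecimalBody cs
      = (cs.all (fun x => PySem.Chars.isdigit x || x == '.')
          && decide (cs.count '.' ≤ 1) && cs.any PySem.Chars.isdigit) := by
  unfold isDecimalBody
  rw [count_single, replace_single, strIsdigit_filter]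
  by_cases h : cs.count '.' ≤ 1
  · rw [if_neg (by omega)]
    simp [h]
  · rw [if_pos (by omega)]
    simp [h]

-- characterisation of A's loop from position 1 on: no sign allowed, at most one dot in total,
-- every character a digit or a dot, and a digit seen somewhere
theorem isDecimalGo_eq (n : Nat) : ∀ (cs : List Char) (i : Nat) (hd hg : Bool),
    1 ≤ i → i + cs.length = n →
    isDecimalGo n hd hg i cs
      = (cs.all (fun x => PySem.Chars.isdigit x || x == '.')
          && decide (cs.count '.' + (if hd then 1 else 0) ≤ 1)
          && (hg || cs.any PySem.Chars.isdigit)) := by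
  intro cs
  induction cs with
  | nil => intro i hd hg _ _; cases hd <;> cases hg <;> simp [isDecimalGo]
  | cons c rest ih =>
    intro i hd hg hi hn
    by_cases hs : c = '+' ∨ c = '-'
    · rw [isDecimalGo, if_pos hs, if_pos (by omega)]
      rcases hs with h | h <;> subst h <;> simp [PySem.Chars.isdigit]
    · by_cases hc : c = '.'
      · subst hc
        rw [isDecimalGo, if_neg hs, if_pos rfl]
        cases hd with
        | true =>
          rw [if_pos rfl]
          simp [List.count_cons]
        | false =>
          rw [if_neg (by simp), if_neg (by simp at hn ⊢; omega)]
          rw [ih (i + 1) true hg (by omega) (by simp at hn ⊢; omega)]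
          simp [PySem.Chars.isdigit]
      · rw [isDecimalGo, if_neg hs, if_neg hc]
        by_cases hdg : PySem.Chars.isdigit c
        · rw [if_neg (by simp [hdg])]
          rw [ih (i + 1) hd true (by omega) (by simp at hn ⊢; omega)]
          simp [hc, hdg]
        · rw [if_pos (by simp [hdg])]
          simp [hdg, hc]

theorem isDecimal_eq_alt (s : String) : isDecimal s = isDecimal_alt s := by
  unfold isDecimal isDecimal_alt
  cases hcs : s.toList with
  | nil => simp
  | cons c rest =>
    show (if (c :: rest).length = 0 then false else isDecimalGo (c :: rest).length false false 0 (c :: rest))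
        = (if c = '+' ∨ c = '-' then if rest.isEmpty = true then false else isDecimalBody rest
           else isDecimalBody (c :: rest))
    rw [if_neg (by simp)]
    by_cases hs : c = '+' ∨ c = '-'
    · rw [isDecimalGo, if_pos hs, if_neg (by simp), if_pos hs]
      cases rest with
      | nil => simp
      | cons r rt =>
        rw [if_neg (by simp), if_neg (by simp [List.isEmpty])]
        rw [isDecimalGo_eq _ (r :: rt) 1 false false (le_refl _) (by simp; omega)]
        rw [isDecimalBody_eq]
        simp
    · by_cases hc : c = '.'
      · subst hc
        rw [isDecimalGo, if_neg hs, if_pos rfl, if_neg (by simp), if_neg hs]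
        cases rest with
        | nil =>
          rw [if_pos (by simp)]
          rw [isDecimalBody_eq]
          simp [PySem.Chars.isdigit]
        | cons r rt =>
          rw [if_neg (by simp)]
          rw [isDecimalGo_eq _ (r :: rt) 1 true false (le_refl _) (by simp; omega)]
          rw [isDecimalBody_eq]
          have hdot : PySem.Chars.isdigit '.' = false := by decide
          simp [List.all_cons, List.any_cons, hdot]
      · rw [isDecimalGo, if_neg hs, if_neg hc, if_neg hs]
        rw [isDecimalBody_eq]
        by_cases hdg : PySem.Chars.isdigit c
        · rw [if_neg (by simp [hdg])]
          rw [isDecimalGo_eq _ rest 1 false true (le_refl _) (by simp; omega)]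
          simp [hc, hdg]
        · rw [if_pos (by simp [hdg])]
          simp [hdg, hc]

-- ===== VERDICT (by name: the statement is the Claim_ definition above) =====
theorem isDecimal_spec : Claim_equal_isDecimal := by
  intro s _
  unfold Spec_isDecimal
  exact isDecimal_eq_alt s
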